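-- pv_equiv track=rewrite | github.com/zOFsky/monthly_table | functions.py | squash_intervals
-- ===== SOURCE A (Python) =====
-- def squash_intervals(numbers):
--     """
--     Takes a list of numbers and returns a list of intervals.
--     Each interval is represented by the first and last number in the consecutive sequence.
--     If a number is not part of a sequence, it will still appear as a pair [number, number].
--
--     Args:
--         numbers (list): A list of sorted numbers.
--
--     Returns:
--         list: A list of lists, where each list is a pair representing an interval.
--     """
--     if not numbers:
--         return []
--
--     # Initialize the list to hold squashed intervals
--     squashed = []
--
--     # Initialize the start of the first interval
--     start = numbers[0]
--
--     for i in range(1, len(numbers)):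
--         # If the current number is not consecutive
--         if numbers[i] != numbers[i - 1] + 1:
--             # Append the interval to the result as a pair [start, end]
--             squashed.append([start, numbers[i - 1]])
--             # Update the start of the next interval
--             start = numbers[i]
--
--     # Add the final interval as a pair [start, end]
--     squashed.append([start, numbers[-1]])
--
--     return squashed
-- ===== SOURCE B (Python) =====
-- def squash_intervals(numbers):
--     """Staged-passes version: first collect the boundary indices where a
--     consecutive run breaks, then build the intervals by pairing run starts
--     with run ends via zip."""
--     if not numbers:
--         return []
--     breaks = [i for i in range(1, len(numbers)) if numbers[i] != numbers[i - 1] + 1]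
--     starts = [0] + breaks
--     ends = [b - 1 for b in breaks] + [len(numbers) - 1]
--     return [[numbers[s], numbers[e]] for s, e in zip(starts, ends)]
-- ===== Notes on version B (the rewrite author's own statement) =====
-- stated objective: alternative
-- what changed: B replaces A's single accumulator loop (running start variable, append at each break, trailing final append) by staged passes: one pass collects the break indices, then starts/ends index lists are formed and zipped, and the intervals are produced by indexing the original list.
import Mathlib
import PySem

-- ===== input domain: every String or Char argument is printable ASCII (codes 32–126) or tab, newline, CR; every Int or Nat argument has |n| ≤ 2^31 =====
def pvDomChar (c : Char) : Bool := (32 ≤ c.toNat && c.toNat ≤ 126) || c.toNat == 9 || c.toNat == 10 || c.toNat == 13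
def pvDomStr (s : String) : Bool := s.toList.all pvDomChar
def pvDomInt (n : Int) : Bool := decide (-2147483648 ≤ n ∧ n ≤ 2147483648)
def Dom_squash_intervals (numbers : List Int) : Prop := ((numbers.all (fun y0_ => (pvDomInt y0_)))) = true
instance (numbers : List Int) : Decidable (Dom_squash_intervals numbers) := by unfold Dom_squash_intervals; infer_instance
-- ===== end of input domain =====

-- B rebuilds the intervals in staged passes (break indices, then zipped start/end
-- index lists) instead of A's accumulator loop; both are O(n): no speed claim.

-- ===== PORT A =====
def squash_intervals (numbers : List Int) : List (List Int) :=
  if numbers = [] then []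
  else
    let start := PySem.List.pyGetD numbers 0 0
    let s := (PySem.List.pyRange 1 (numbers.length : Int) 1).foldl
      (fun (st : List (List Int) × Int) i =>
        if PySem.List.pyGetD numbers i 0 ≠ PySem.List.pyGetD numbers (i - 1) 0 + 1 then
          (st.1 ++ [[st.2, PySem.List.pyGetD numbers (i - 1) 0]], PySem.List.pyGetD numbers i 0)
        else st)
      ([], start)
    s.1 ++ [[s.2, PySem.List.pyGetD numbers (-1) 0]]

-- ===== PORT B =====
def squash_intervals_alt (numbers : List Int) : List (List Int) :=
  if numbers = [] then []
  else
    let breaks := (PySem.List.pyRange 1 (numbers.length : Int) 1).filter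
      (fun i => decide (PySem.List.pyGetD numbers i 0 ≠ PySem.List.pyGetD numbers (i - 1) 0 + 1))
    let starts := 0 :: breaks
    let ends := breaks.map (fun b => b - 1) ++ [(numbers.length : Int) - 1]
    (starts.zip ends).map (fun p => [PySem.List.pyGetD numbers p.1 0, PySem.List.pyGetD numbers p.2 0])

-- ===== PRECONDITION & SPEC =====
def Spec_squash_intervals (numbers : List Int) (out : List (List Int)) : Prop := out = squash_intervals_alt numbers
instance (numbers : List Int) (out : List (List Int)) : Decidable (Spec_squash_intervals numbers out) := by unfold Spec_squash_intervals; infer_instance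

-- ===== CLAIM (what is proved, stated in full; the proofs are below) =====
def Claim_equal_squash_intervals : Prop := ∀ (numbers : List Int), Dom_squash_intervals numbers → Spec_squash_intervals numbers (squash_intervals numbers)

-- ===== LEMMAS AND PROOFS =====

/-- Common shape: intervals produced from a list of break indices, with a running
start value `v` and a fixed final end value `last`. -/
def pvChain (numbers : List Int) (last : Int) (v : Int) : List Int → List (List Int)
  | [] => [[v, last]]
  | b :: r => [v, PySem.List.pyGetD numbers (b - 1) 0] :: pvChain numbers last (PySem.List.pyGetD numbers b 0) r

/-- A's guarded fold over all indices is the unguarded fold over the filtered break indices. -/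
theorem pvA_filter (numbers : List Int) :
    ∀ (l : List Int) (init : List (List Int) × Int),
      l.foldl (fun st i =>
          if PySem.List.pyGetD numbers i 0 ≠ PySem.List.pyGetD numbers (i - 1) 0 + 1 then
            (st.1 ++ [[st.2, PySem.List.pyGetD numbers (i - 1) 0]], PySem.List.pyGetD numbers i 0)
          else st) init
      = (l.filter (fun i => decide (PySem.List.pyGetD numbers i 0 ≠ PySem.List.pyGetD numbers (i - 1) 0 + 1))).foldl
          (fun st i => (st.1 ++ [[st.2, PySem.List.pyGetD numbers (i - 1) 0]], PySem.List.pyGetD numbers i 0)) init := by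
  intro l
  induction l with
  | nil => intro init; rfl
  | cons x xs ih =>
    intro init
    rw [List.foldl_cons, List.filter_cons]
    by_cases h : PySem.List.pyGetD numbers x 0 ≠ PySem.List.pyGetD numbers (x - 1) 0 + 1
    · rw [if_pos h, if_pos (by simpa using h), List.foldl_cons]
      exact ih _
    · rw [if_neg h, if_neg (by simpa using h)]
      exact ih init

/-- A's fold over the break indices, closed with the final interval, is `pvChain`. -/
theorem pvA_chain (numbers : List Int) (last : Int) :
    ∀ (bs : List Int) (acc : List (List Int)) (v : Int),
      (bs.foldl (fun (st : List (List Int) × Int) i =>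
          (st.1 ++ [[st.2, PySem.List.pyGetD numbers (i - 1) 0]], PySem.List.pyGetD numbers i 0)) (acc, v)).1
        ++ [[(bs.foldl (fun (st : List (List Int) × Int) i =>
          (st.1 ++ [[st.2, PySem.List.pyGetD numbers (i - 1) 0]], PySem.List.pyGetD numbers i 0)) (acc, v)).2, last]]
      = acc ++ pvChain numbers last v bs := by
  intro bs
  induction bs with
  | nil => intro acc v; simp [pvChain]
  | cons b r ih =>
    intro acc v
    simp only [List.foldl_cons, pvChain]
    rw [ih]
    simp

/-- B's zip-and-index construction over the break indices is the same `pvChain`. -/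
theorem pvB_chain (numbers : List Int) :
    ∀ (bs : List Int) (s0 : Int),
      ((s0 :: bs).zip (bs.map (fun b => b - 1) ++ [(numbers.length : Int) - 1])).map
        (fun p => [PySem.List.pyGetD numbers p.1 0, PySem.List.pyGetD numbers p.2 0])
      = pvChain numbers (PySem.List.pyGetD numbers ((numbers.length : Int) - 1) 0)
          (PySem.List.pyGetD numbers s0 0) bs := by
  intro bs
  induction bs with
  | nil => intro s0; simp [pvChain]
  | cons b r ih =>
    intro s0
    simp only [List.map_cons, List.cons_append, List.zip_cons_cons, List.map, pvChain]
    rw [ih]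

/-- The two final end values agree on a nonempty list: `numbers[-1] = numbers[len-1]`. -/
theorem pvLast_eq (numbers : List Int) (h : numbers ≠ []) :
    PySem.List.pyGetD numbers (-1) 0 = PySem.List.pyGetD numbers ((numbers.length : Int) - 1) 0 := by
  have hlen : 0 < numbers.length := List.length_pos_iff.mpr h
  have hc : (numbers.length : Int) - 1 = ((numbers.length - 1 : Nat) : Int) := by omega
  rw [PySem.List.pyGetD_neg_one numbers 0 h, hc, PySem.List.pyGetD_natCast]
  rw [List.getLast_eq_getElem h]
  rw [List.getD_eq_getElem numbers 0 (by omega)]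

-- ===== VERDICT (by name: the statement is the Claim_ definition above) =====
theorem squash_intervals_spec : Claim_equal_squash_intervals := by
  intro numbers _
  unfold Spec_squash_intervals squash_intervals squash_intervals_alt
  by_cases h : numbers = []
  · simp [h]
  · rw [if_neg h, if_neg h]
    simp only []
    rw [pvA_filter, pvA_chain, pvB_chain]
    rw [pvLast_eq numbers h]
    simp
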